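-- pv_equiv track=rewrite | github.com/MSc-Smart-Contract-Auditing/data-scraper | src/helpers/parse.py | group_by_section_and_join
-- ===== SOURCE A (Python) =====
-- def group_by_section_and_join(items):
--     sections = {}
--     for section, parsed_item in items:
--         if section not in sections:
--             sections[section] = parsed_item["text"]
--             continue
--         sections[section] += f"\n{parsed_item['text']}"
--     return sections
-- ===== SOURCE B (Python) =====
-- def group_by_section_and_join(items):
--     groups = {}
--     for section, parsed_item in items:
--         groups.setdefault(section, []).append(parsed_item["text"])
--     return {section: "\n".join(texts) for section, texts in groups.items()}
-- ===== Notes on version B (the rewrite author's own statement) =====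
-- stated objective: idiomatic
-- what changed: B collects each section's texts into a per-section list via setdefault/append and joins each list with '\n' in a separate dict comprehension, instead of A's running string concatenation stored in the dict.
import Mathlib
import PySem

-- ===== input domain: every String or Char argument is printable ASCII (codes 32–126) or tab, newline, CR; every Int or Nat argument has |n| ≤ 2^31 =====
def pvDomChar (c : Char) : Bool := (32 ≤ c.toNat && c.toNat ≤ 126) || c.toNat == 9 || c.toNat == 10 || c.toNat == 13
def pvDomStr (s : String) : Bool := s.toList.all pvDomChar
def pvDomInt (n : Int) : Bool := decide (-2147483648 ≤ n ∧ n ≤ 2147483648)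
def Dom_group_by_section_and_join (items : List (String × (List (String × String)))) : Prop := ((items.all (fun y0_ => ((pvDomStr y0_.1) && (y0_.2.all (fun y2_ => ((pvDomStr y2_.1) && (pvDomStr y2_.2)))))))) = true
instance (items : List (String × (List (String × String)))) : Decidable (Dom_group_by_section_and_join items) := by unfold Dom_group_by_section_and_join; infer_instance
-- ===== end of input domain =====

-- B groups each section's texts into a list (setdefault/append) and joins them with '\n' in a second
-- pass, instead of A's running string concatenation inside the dict; return values proved equal.

-- shared helper: parsed_item["text"] (both Pythons perform this exact lookup);
-- total form under Pre_, which requires the key "text" to be present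
def pvText (p : List (String × String)) : String :=
  ((PySem.Dict.mk p).get? "text").getD ""

-- ===== PORT A =====
def group_by_section_and_join (items : List (String × (List (String × String)))) : List (String × String) :=
  (items.foldl
    (fun sections x =>
      if sections.contains x.1 = false then
        sections.insert x.1 (pvText x.2)
      else
        sections.insert x.1 (sections.getD x.1 "" ++ ("\n" ++ pvText x.2)))
    PySem.Dict.empty).items

-- ===== PORT B =====
def group_by_section_and_join_alt (items : List (String × (List (String × String)))) : List (String × String) :=
  (items.foldl
    (fun groups x => groups.modify x.1 [] (fun ts => ts ++ [pvText x.2]))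
    PySem.Dict.empty).items.map
    (fun p => (p.1, PySem.Str.join "\n" p.2))

-- ===== PRECONDITION & SPEC =====
-- Pre_ excludes exactly the inputs on which A raises KeyError: an item whose dict lacks the key "text"
def Pre_group_by_section_and_join (items : List (String × (List (String × String)))) : Prop :=
  ∀ x ∈ items, "text" ∈ x.2.map (·.1)
instance (items : List (String × (List (String × String)))) : Decidable (Pre_group_by_section_and_join items) := by unfold Pre_group_by_section_and_join; infer_instance
def pvWitness_group_by_section_and_join : (List (String × (List (String × String)))) :=
  [("s", [("text", "a")]), ("t", [("text", "b")]), ("s", [("text", "c")])]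

def Spec_group_by_section_and_join (items : List (String × (List (String × String)))) (out : List (String × String)) : Prop := out = group_by_section_and_join_alt items
instance (items : List (String × (List (String × String)))) (out : List (String × String)) : Decidable (Spec_group_by_section_and_join items out) := by unfold Spec_group_by_section_and_join; infer_instance

-- ===== CLAIM (what is proved, stated in full; the proofs are below) =====
def Claim_equal_group_by_section_and_join : Prop := ∀ (items : List (String × (List (String × String)))), Dom_group_by_section_and_join items → Pre_group_by_section_and_join items → Spec_group_by_section_and_join items (group_by_section_and_join items)

-- ===== LEMMAS AND PROOFS =====

-- one += step of A, at the Option level: none ↦ first text, some c ↦ c + "\n" + text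
def pvAcc (o : Option String) (t : String) : Option String :=
  some (match o with | none => t | some c => c ++ ("\n" ++ t))

-- the value A's loop has built for one key, as a fold over that key's texts
def pvFold (o : Option String) (ts : List String) : Option String := ts.foldl pvAcc o

theorem pvFold_some (rest : List String) (c : String) :
    pvFold (some c) rest = some (rest.foldl (fun c t => c ++ ("\n" ++ t)) c) := by
  induction rest generalizing c with
  | nil => rfl
  | cons t rest ih => simpa [pvFold, pvAcc, List.foldl] using ih (c ++ ("\n" ++ t))

theorem join_head_absorb (sep c u : List Char) (ts : List (List Char)) :
    PySem.Chars.join sep ((c ++ sep ++ u) :: ts) = c ++ sep ++ PySem.Chars.join sep (u :: ts) := by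
  cases ts with
  | nil => simp [PySem.Chars.join, List.intercalate]
  | cons v ts =>
    rw [PySem.Chars.join_cons_cons, PySem.Chars.join_cons_cons]
    simp [List.append_assoc]

theorem str_head_absorb (t u : String) (rest : List String) :
    PySem.Str.join "\n" ((t ++ ("\n" ++ u)) :: rest) = PySem.Str.join "\n" (t :: u :: rest) := by
  apply String.toList_inj.mp
  rw [PySem.Str.toList_join, PySem.Str.toList_join, List.map_cons, List.map_cons, List.map_cons]
  have h : (t ++ ("\n" ++ u)).toList = t.toList ++ "\n".toList ++ u.toList := by
    simp [String.toList_append]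
  rw [h, join_head_absorb, PySem.Chars.join_cons_cons]

theorem foldl_append_eq_join (t : String) (rest : List String) :
    rest.foldl (fun c t => c ++ ("\n" ++ t)) t = PySem.Str.join "\n" (t :: rest) := by
  induction rest generalizing t with
  | nil =>
    apply String.toList_inj.mp
    rw [PySem.Str.toList_join]
    simp [PySem.Chars.join, List.intercalate]
  | cons u rest ih =>
    rw [List.foldl_cons, ih (t ++ ("\n" ++ u)), str_head_absorb]

-- characterisation of A's dict at one key
theorem A_get? (l : List (String × (List (String × String))))
    (d : PySem.Dict String String) (k : String) :
    (l.foldl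
      (fun sections x =>
        if sections.contains x.1 = false then
          sections.insert x.1 (pvText x.2)
        else
          sections.insert x.1 (sections.getD x.1 "" ++ ("\n" ++ pvText x.2)))
      d).get? k
    = pvFold (d.get? k) ((l.filter (fun x => x.1 == k)).map (fun x => pvText x.2)) := by
  induction l generalizing d with
  | nil => rfl
  | cons p rest ih =>
    simp only [List.foldl_cons]
    rw [ih]
    by_cases hpk : p.1 = k
    · subst hpk
      have hfil : ((p :: rest).filter (fun x => x.1 == p.1)) = p :: rest.filter (fun x => x.1 == p.1) := by
        simp
      rw [hfil, List.map_cons]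
      have hstep : ∀ o ts, pvFold o (pvText p.2 :: ts) = pvFold (pvAcc o (pvText p.2)) ts := by
        intro o ts; rfl
      rw [hstep]
      congr 1
      by_cases hc : d.contains p.1 = false
      · have hn : d.get? p.1 = none := by
          rw [PySem.Dict.contains_eq_isSome_get?] at hc
          exact Option.not_isSome_iff_eq_none.mp (by simp [hc])
        simp [hc, hn, pvAcc]
      · have hs : (d.get? p.1).isSome := by
          rw [PySem.Dict.contains_eq_isSome_get?] at hc
          exact Option.ne_none_iff_isSome.mp (by simpa using hc)
        obtain ⟨c, hcv⟩ := Option.isSome_iff_exists.mp hs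
        have hgd : d.getD p.1 "" = c := PySem.Dict.getD_of_get?_eq_some d "" hcv
        simp [hc, hcv, hgd, pvAcc]
    · have hfil : ((p :: rest).filter (fun x => x.1 == k)) = rest.filter (fun x => x.1 == k) := by
        simp [hpk]
      rw [hfil]
      congr 1
      by_cases hc : d.contains p.1 = false <;>
        simp [hc, PySem.Dict.get?_insert, Ne.symm hpk]

-- ===== VERDICT (by name: the statement is the Claim_ definition above) =====
theorem group_by_section_and_join_spec : Claim_equal_group_by_section_and_join := by
  intro items _ hpre
  unfold Spec_group_by_section_and_join
  unfold group_by_section_and_join group_by_section_and_join_alt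
  -- A's loop is an insert-keyed loop
  have hA : items.foldl
      (fun sections x =>
        if sections.contains x.1 = false then
          sections.insert x.1 (pvText x.2)
        else
          sections.insert x.1 (sections.getD x.1 "" ++ ("\n" ++ pvText x.2)))
      PySem.Dict.empty
    = items.foldl
      (fun sections x => sections.insert x.1
        (if sections.contains x.1 = false then pvText x.2
         else sections.getD x.1 "" ++ ("\n" ++ pvText x.2)))
      PySem.Dict.empty := by
    apply PySem.List.foldl_congr_mem
    intro acc x _
    by_cases h : acc.contains x.1 = false <;> simp [h]
  set dA := items.foldl
      (fun sections x =>
        if sections.contains x.1 = false then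
          sections.insert x.1 (pvText x.2)
        else
          sections.insert x.1 (sections.getD x.1 "" ++ ("\n" ++ pvText x.2)))
      PySem.Dict.empty with hdA
  set dB := items.foldl
      (fun groups x => groups.modify x.1 [] (fun ts => ts ++ [pvText x.2]))
      PySem.Dict.empty with hdB
  have hkA : dA.keys = PySem.Set.update [] (items.map (·.1)) := by
    rw [hA, PySem.Dict.keys_foldl_insert_key items (·.1), PySem.Dict.keys_empty]
  have hkB : dB.keys = PySem.Set.update [] (items.map (·.1)) := by
    rw [hdB, PySem.Dict.keys_foldl_modify_key items (·.1), PySem.Dict.keys_empty]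
  have hndA : dA.keys.Nodup := by
    rw [hA]
    exact PySem.Dict.nodup_keys_foldl_insert_key items (·.1) _ _ (by simp [PySem.Dict.keys_empty])
  have hndB : dB.keys.Nodup := by
    rw [hdB]
    exact PySem.Dict.nodup_keys_foldl_modify_key items (·.1) _ _ _ (by simp [PySem.Dict.keys_empty])
  rw [PySem.Dict.items_eq_map_keys dA hndA "", PySem.Dict.items_eq_map_keys dB hndB [],
      List.map_map, hkA, hkB]
  apply List.map_congr_left
  intro k hk
  simp only [Function.comp]
  congr 1
  -- B's value at k
  have hB : dB.getD k [] = (items.filter (fun x => x.1 == k)).map (fun x => pvText x.2) := by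
    have := PySem.Dict.getD_foldl_modify_append
      (items.map (fun x => (x.1, pvText x.2))) (PySem.Dict.empty (κ := String) (ν := List String)) k
    rw [List.foldl_map] at this
    rw [hdB]
    simpa [List.filter_map, List.map_map, Function.comp] using this
  -- A's value at k
  have hAk : dA.get? k = pvFold none ((items.filter (fun x => x.1 == k)).map (fun x => pvText x.2)) := by
    rw [hdA, A_get?, PySem.Dict.get?_empty]
  -- k occurs, so the filtered list is nonempty
  have hkmem : k ∈ items.map (·.1) := by
    have := (PySem.Set.mem_update [] (items.map (·.1)) k).mp hk
    simpa using this
  obtain ⟨x, hx, hx1⟩ := List.mem_map.mp hkmem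
  have hne : (items.filter (fun x => x.1 == k)).map (fun x => pvText x.2) ≠ [] := by
    simp only [ne_eq, List.map_eq_nil_iff, List.filter_eq_nil_iff]
    intro h
    exact h x hx (by simp [hx1])
  cases hm : (items.filter (fun x => x.1 == k)).map (fun x => pvText x.2) with
  | nil => exact absurd hm hne
  | cons t rest =>
    rw [hm] at hAk
    have : pvFold none (t :: rest) = pvFold (some t) rest := rfl
    rw [this, pvFold_some] at hAk
    rw [hB, hm, PySem.Dict.getD_of_get?_eq_some dA "" hAk, foldl_append_eq_join]
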